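-- pv_equiv track=rewrite | github.com/Slapstick77/PARTTRACKER | Application/src/newtracker/db_sqlserver.py | translate_qmark_to_pyformat
-- ===== SOURCE A (Python) =====
-- def translate_qmark_to_pyformat(operation: str) -> str:
--     translated: list[str] = []
--     in_single_quote = False
--     in_double_quote = False
--     index = 0
--     length = len(operation)
--
--     while index < length:
--         char = operation[index]
--         next_char = operation[index + 1] if index + 1 < length else ""
--
--         if char == "'" and not in_double_quote:
--             translated.append(char)
--             if in_single_quote and next_char == "'":
--                 translated.append(next_char)
--                 index += 2
--                 continue
--             in_single_quote = not in_single_quote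
--             index += 1
--             continue
--
--         if char == '"' and not in_single_quote:
--             translated.append(char)
--             if in_double_quote and next_char == '"':
--                 translated.append(next_char)
--                 index += 2
--                 continue
--             in_double_quote = not in_double_quote
--             index += 1
--             continue
--
--         if char == "?" and not in_single_quote and not in_double_quote:
--             translated.append("%s")
--         else:
--             translated.append(char)
--         index += 1
--
--     return "".join(translated)
-- ===== SOURCE B (Python) =====
-- def _skip_quoted(s: str, i: int, q: str) -> int:
--     """s[i] is the opening quote q; return the index just past the quoted
--     region, treating a doubled quote qq inside it as an escaped quote.
--     An unterminated region extends to the end of the string."""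
--     j = i + 1
--     n = len(s)
--     while j < n:
--         if s[j] != q:
--             j += 1
--         elif j + 1 < n and s[j + 1] == q:
--             j += 2
--         else:
--             return j + 1
--     return j
--
--
-- def translate_qmark_to_pyformat(operation: str) -> str:
--     out = []
--     i = 0
--     n = len(operation)
--     while i < n:
--         ch = operation[i]
--         if ch == "'" or ch == '"':
--             j = _skip_quoted(operation, i, ch)
--             out.append(operation[i:j])
--             i = j
--         elif ch == "?":
--             out.append("%s")
--             i += 1
--         else:
--             out.append(ch)
--             i += 1
--     return "".join(out)
-- ===== Notes on version B (the rewrite author's own statement) =====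
-- stated objective: simpler
-- what changed: Replaces A's flag-based state machine (in_single_quote/in_double_quote booleans with inline lookahead for doubled quotes) by a stateless dispatcher that, on meeting either quote character, hands off to one generic region-skipping helper and copies the whole quoted region as a single slice; question-mark placeholders are rewritten only in the unquoted stretches.
import Mathlib
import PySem

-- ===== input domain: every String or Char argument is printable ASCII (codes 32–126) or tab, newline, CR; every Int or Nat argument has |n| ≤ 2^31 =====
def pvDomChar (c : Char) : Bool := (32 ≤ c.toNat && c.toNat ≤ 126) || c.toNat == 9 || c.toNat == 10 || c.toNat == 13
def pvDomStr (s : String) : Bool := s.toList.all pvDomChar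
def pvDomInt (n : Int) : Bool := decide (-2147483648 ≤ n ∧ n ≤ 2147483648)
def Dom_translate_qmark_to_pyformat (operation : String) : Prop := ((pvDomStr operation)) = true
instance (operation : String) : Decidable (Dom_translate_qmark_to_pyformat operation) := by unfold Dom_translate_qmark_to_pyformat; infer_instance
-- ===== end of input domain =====

-- B replaces A's two-boolean state machine by a stateless dispatcher with one generic
-- quoted-region-skipping helper (objective: simpler; same O(n) cost).

-- ===== PORT A =====
-- literal port of A's while loop: recursion over the remaining characters, carrying the two
-- booleans in_single_quote / in_double_quote; next_char lookahead = head?, 'index += 2' = drop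
-- the current char and the tail's head.
def pvALoop : List Char → Bool → Bool → List Char
  | [], _, _ => []
  | c :: rest, insq, indq =>
    if c = '\'' ∧ indq = false then
      if insq = true ∧ rest.head? = some '\'' then
        '\'' :: '\'' :: pvALoop rest.tail insq indq
      else
        '\'' :: pvALoop rest (!insq) indq
    else if c = '"' ∧ insq = false then
      if indq = true ∧ rest.head? = some '"' then
        '"' :: '"' :: pvALoop rest.tail insq indq
      else
        '"' :: pvALoop rest insq (!indq)
    else if c = '?' ∧ insq = false ∧ indq = false then
      '%' :: 's' :: pvALoop rest insq indq
    else
      c :: pvALoop rest insq indq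
termination_by l _ _ => l.length
decreasing_by all_goals simp [List.length_tail]

def translate_qmark_to_pyformat (operation : String) : String :=
  String.ofList (pvALoop operation.toList false false)

-- ===== PORT B =====
-- port of Source B's _skip_quoted: returns (the quoted region after the opening quote, the rest);
-- the Python index arithmetic over s becomes the same walk over the remaining characters.
def pvSkipQuoted (q : Char) : List Char → List Char × List Char
  | [] => ([], [])
  | c :: rest =>
    if c = q then
      match rest with
      | c2 :: rest2 =>
        if c2 = q then                      -- doubled quote: escaped, stay inside
          (q :: q :: (pvSkipQuoted q rest2).1, (pvSkipQuoted q rest2).2)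
        else ([q], rest)                    -- closing quote
      | [] => ([q], [])                     -- closing quote at end of string
    else
      (c :: (pvSkipQuoted q rest).1, (pvSkipQuoted q rest).2)

theorem pvSkipQuoted_snd_le (q : Char) : ∀ (l : List Char), (pvSkipQuoted q l).2.length ≤ l.length
  | [] => by rw [pvSkipQuoted.eq_def]
  | [c] => by
    rw [pvSkipQuoted.eq_def]
    by_cases h : c = q
    · simp [h]
    · simp only [if_neg h]
      rw [pvSkipQuoted.eq_def]
      simp
  | c :: c2 :: rest2 => by
    rw [pvSkipQuoted.eq_def]
    by_cases h : c = q
    · by_cases h2 : c2 = q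
      · have := pvSkipQuoted_snd_le q rest2
        simp [h, h2]; omega
      · simp [h, h2]
    · have := pvSkipQuoted_snd_le q (c2 :: rest2)
      simp at this
      simp [h]; omega

-- port of Source B's main loop: dispatch on the current character; a quote hands the tail
-- to pvSkipQuoted and the whole region is emitted at once.
def pvBLoop : List Char → List Char
  | [] => []
  | c :: rest =>
    if c = '\'' ∨ c = '"' then
      c :: ((pvSkipQuoted c rest).1 ++ pvBLoop (pvSkipQuoted c rest).2)
    else if c = '?' then '%' :: 's' :: pvBLoop rest
    else c :: pvBLoop rest
termination_by l => l.length
decreasing_by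
  · have := pvSkipQuoted_snd_le c rest; simp; omega
  · simp
  · simp

def translate_qmark_to_pyformat_alt (operation : String) : String :=
  String.ofList (pvBLoop operation.toList)

-- ===== PRECONDITION & SPEC =====
def Spec_translate_qmark_to_pyformat (operation : String) (out : String) : Prop := out = translate_qmark_to_pyformat_alt operation
instance (operation : String) (out : String) : Decidable (Spec_translate_qmark_to_pyformat operation out) := by unfold Spec_translate_qmark_to_pyformat; infer_instance

-- ===== CLAIM (what is proved, stated in full; the proofs are below) =====
def Claim_equal_translate_qmark_to_pyformat : Prop := ∀ (operation : String), Dom_translate_qmark_to_pyformat operation → Spec_translate_qmark_to_pyformat operation (translate_qmark_to_pyformat operation)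

-- ===== LEMMAS AND PROOFS =====

-- Inside a single-quoted region A (with in_single_quote = true) copies characters verbatim,
-- doubles '' and exits on a lone ': exactly B's region skipper.
theorem pvALoop_single : ∀ (l : List Char),
    pvALoop l true false = (pvSkipQuoted '\'' l).1 ++ pvALoop (pvSkipQuoted '\'' l).2 false false
  | [] => by rw [pvSkipQuoted.eq_def, pvALoop.eq_def, pvALoop.eq_def]; simp
  | c :: rest => by
    rw [pvSkipQuoted.eq_def, pvALoop.eq_def]
    by_cases hc : c = '\''
    · subst hc
      match rest with
      | [] => rw [pvALoop.eq_def]; simp; rw [pvALoop.eq_def]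
      | c2 :: rest2 =>
        by_cases h2 : c2 = '\''
        · subst h2
          have ih := pvALoop_single rest2
          simp [ih]
        · simp [h2]
    · have ih := pvALoop_single rest
      simp [hc, ih]
termination_by l => l.length
decreasing_by all_goals simp

-- Symmetric fact for double quotes (in_double_quote = true).
theorem pvALoop_double : ∀ (l : List Char),
    pvALoop l false true = (pvSkipQuoted '"' l).1 ++ pvALoop (pvSkipQuoted '"' l).2 false false
  | [] => by rw [pvSkipQuoted.eq_def, pvALoop.eq_def, pvALoop.eq_def]; simp
  | c :: rest => by
    rw [pvSkipQuoted.eq_def, pvALoop.eq_def]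
    by_cases hc : c = '"'
    · subst hc
      match rest with
      | [] => rw [pvALoop.eq_def]; simp; rw [pvALoop.eq_def]
      | c2 :: rest2 =>
        by_cases h2 : c2 = '"'
        · subst h2
          have ih := pvALoop_double rest2
          simp [ih]
        · simp [h2]
    · have ih := pvALoop_double rest
      simp [hc, ih]
termination_by l => l.length
decreasing_by all_goals simp

-- Outside any quote the two loops agree (strong induction on the length: a quoted region
-- consumes arbitrarily many characters at once on B's side).
theorem pvLoop_eq : ∀ (l : List Char), pvALoop l false false = pvBLoop l := by
  intro l
  induction hn : l.length using Nat.strong_induction_on generalizing l with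
  | _ n ih =>
    match l with
    | [] => rw [pvALoop.eq_def, pvBLoop.eq_def]
    | c :: rest =>
      subst hn
      rw [pvALoop.eq_def, pvBLoop.eq_def]
      by_cases hs : c = '\''
      · subst hs
        have hlen := pvSkipQuoted_snd_le '\'' rest
        have hB := ih (pvSkipQuoted '\'' rest).2.length (by simp; omega) _ rfl
        simp [pvALoop_single rest, hB]
      · by_cases hd : c = '"'
        · subst hd
          have hlen := pvSkipQuoted_snd_le '"' rest
          have hB := ih (pvSkipQuoted '"' rest).2.length (by simp; omega) _ rfl
          simp [pvALoop_double rest, hB]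
        · have ihr := ih rest.length (by simp) rest rfl
          by_cases hq : c = '?'
          · subst hq; simp [ihr]
          · simp [hs, hd, hq, ihr]

-- ===== VERDICT (by name: the statement is the Claim_ definition above) =====
theorem translate_qmark_to_pyformat_spec : Claim_equal_translate_qmark_to_pyformat := by
  intro operation _
  unfold Spec_translate_qmark_to_pyformat translate_qmark_to_pyformat translate_qmark_to_pyformat_alt
  rw [pvLoop_eq]
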